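-- pv_equiv track=rewrite | github.com/felicityallen/SelfTarget | selftarget_pyutils/selftarget/profile.py | getHighestIndel
-- ===== SOURCE A (Python) =====
-- def getHighestIndel(p1):
--     cnts = [(p1[x],x) for x in p1]
--     cnts.sort(reverse=True)
--     if (len(p1) == 1 and '-' in p1) or len(p1) == 0:
--         return '-'
--     if cnts[0][1] == '-' and len(cnts)>1:
--         return cnts[1][1]
--     else:
--         return cnts[0][1]
-- ===== SOURCE B (Python) =====
-- def getHighestIndel(p1):
--     candidates = [x for x in p1 if x != '-']
--     if not candidates:
--         return '-'
--     return max(candidates, key=lambda x: (p1[x], x))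
-- ===== Notes on version B (the rewrite author's own statement) =====
-- stated objective: simpler
-- what changed: Replaces building and reverse-sorting the full (count, key) list plus index/length guards with a single filtered linear max scan over the non-'-' keys using the tuple key (count, key).
import Mathlib
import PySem

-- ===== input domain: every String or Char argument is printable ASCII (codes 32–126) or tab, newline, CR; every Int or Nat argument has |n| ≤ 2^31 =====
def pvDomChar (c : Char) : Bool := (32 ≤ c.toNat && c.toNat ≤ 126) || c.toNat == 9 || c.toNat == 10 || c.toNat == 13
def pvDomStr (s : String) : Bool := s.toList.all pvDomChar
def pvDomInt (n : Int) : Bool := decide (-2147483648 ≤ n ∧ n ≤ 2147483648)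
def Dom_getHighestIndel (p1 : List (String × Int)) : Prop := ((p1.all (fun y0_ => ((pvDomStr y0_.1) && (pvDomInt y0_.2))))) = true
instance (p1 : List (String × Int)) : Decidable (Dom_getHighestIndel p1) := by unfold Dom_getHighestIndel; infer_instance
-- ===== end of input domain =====

-- B replaces A's build-and-reverse-sort of (count, key) pairs with a single filtered
-- linear max scan over the non-'-' keys (objective: simpler).

-- ===== PORT A =====
def getHighestIndel (p1 : List (String × Int)) : String :=
  let d := PySem.Dict.ofList p1
  let cnts := d.keys.map (fun x => (d.getD x 0, x))
  let cs := PySem.List.sorted2 cnts (fun p => p.1) (fun p => p.2) true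
  if (d.size == 1 && d.contains "-") || d.size == 0 then "-"
  else if (PySem.List.pyGetD cs 0 ((0:Int), "-")).2 == "-" && decide (1 < cs.length) then
    (PySem.List.pyGetD cs 1 ((0:Int), "-")).2
  else (PySem.List.pyGetD cs 0 ((0:Int), "-")).2

-- ===== PORT B =====
def getHighestIndel_alt (p1 : List (String × Int)) : String :=
  let d := PySem.Dict.ofList p1
  let candidates := d.keys.filter (fun x => x != "-")
  match PySem.List.max2? candidates (fun x => d.getD x 0) (fun x => x) with
  | none => "-"
  | some m => m

-- ===== PRECONDITION & SPEC =====
def Spec_getHighestIndel (p1 : List (String × Int)) (out : String) : Prop := out = getHighestIndel_alt p1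
instance (p1 : List (String × Int)) (out : String) : Decidable (Spec_getHighestIndel p1 out) := by unfold Spec_getHighestIndel; infer_instance

-- ===== CLAIM (what is proved, stated in full; the proofs are below) =====
def Claim_equal_getHighestIndel : Prop := ∀ (p1 : List (String × Int)), Dom_getHighestIndel p1 → Spec_getHighestIndel p1 (getHighestIndel p1)

-- ===== LEMMAS AND PROOFS =====

-- Python's tuple comparison guard (as sorted2/max2? spell it) is the lexicographic order.
theorem pv_lex_guard {κ₁ κ₂ : Type} [LinearOrder κ₁] [LinearOrder κ₂] (a1 b1 : κ₁) (a2 b2 : κ₂) :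
    (decide (a1 < b1) || (!decide (b1 < a1) && decide (a2 < b2))) = decide (toLex (a1, a2) < toLex (b1, b2)) := by
  rcases lt_trichotomy a1 b1 with h|h|h
  · simp [Prod.Lex.lt_iff, h]
  · subst h; simp [Prod.Lex.lt_iff]
  · simp [Prod.Lex.lt_iff, h, not_lt_of_gt h, ne_of_gt h]

theorem pv_sorted2_eq {α κ₁ κ₂ : Type} [LinearOrder κ₁] [LinearOrder κ₂]
    (xs : List α) (k1 : α → κ₁) (k2 : α → κ₂) (rev : Bool) :
    PySem.List.sorted2 xs k1 k2 rev = PySem.List.sorted xs (fun x => toLex (k1 x, k2 x)) rev := by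
  simp only [PySem.List.sorted2, PySem.List.sorted]
  cases rev <;> simp only [Bool.false_eq_true, if_false, if_true] <;>
    congr 1 <;> funext acc x <;> congr 1 <;> funext a b <;> exact pv_lex_guard _ _ _ _

theorem pv_max2?_eq {α κ₁ κ₂ : Type} [LinearOrder κ₁] [LinearOrder κ₂]
    (xs : List α) (k1 : α → κ₁) (k2 : α → κ₂) :
    PySem.List.max2? xs k1 k2 = PySem.List.max? xs (fun x => toLex (k1 x, k2 x)) := by
  simp only [PySem.List.max2?, PySem.List.max?]
  congr 1; funext acc x
  cases acc with
  | none => rfl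
  | some m => simp only []; rw [pv_lex_guard]; simp

theorem pv_max?_unique {α κ : Type} [LinearOrder κ] {xs : List α} {key : α → κ} {m : α}
    (hm : m ∈ xs) (hmax : ∀ y ∈ xs, y ≠ m → key y < key m) :
    PySem.List.max? xs key = some m := by
  cases hx : PySem.List.max? xs key with
  | none => rw [PySem.List.max?_eq_none_iff] at hx; subst hx; cases hm
  | some m' =>
    by_cases h : m' = m
    · rw [h]
    · have h1 := PySem.List.max?_isMax hx m hm
      have h2 := hmax m' (PySem.List.max?_mem hx) h
      exact absurd h1 (not_le_of_gt h2)

theorem pv_core (d : PySem.Dict String Int) (hnd : d.keys.Nodup) :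
    (let cnts := d.keys.map (fun x => (d.getD x 0, x))
     let cs := PySem.List.sorted2 cnts (fun p => p.1) (fun p => p.2) true
     if (d.size == 1 && d.contains "-") || d.size == 0 then "-"
     else if (PySem.List.pyGetD cs 0 ((0:Int), "-")).2 == "-" && decide (1 < cs.length) then
       (PySem.List.pyGetD cs 1 ((0:Int), "-")).2
     else (PySem.List.pyGetD cs 0 ((0:Int), "-")).2)
    = (let candidates := d.keys.filter (fun x => x != "-")
       match PySem.List.max2? candidates (fun x => d.getD x 0) (fun x => x) with
       | none => "-"
       | some m => m) := by
  have hsz : d.size = d.keys.length := by simp [PySem.Dict.size, PySem.Dict.keys]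
  set f : String → Int × String := fun x => (d.getD x 0, x) with hf
  have finj : Function.Injective f := fun a b h => congrArg Prod.snd h
  set KK : Int × String → Lex (Int × String) := fun p => toLex (p.1, p.2) with hKK
  have KKinj : Function.Injective KK := fun a b h => congrArg ofLex h
  by_cases h0 : d.keys = []
  · simp [h0, hsz, PySem.List.max2?]
  by_cases h1 : d.keys = ["-"]
  · simp [h1, hsz, PySem.Dict.contains_eq_decide_mem_keys, PySem.List.max2?]
  -- main case: at least one key other than '-'
  have hguard : ((d.size == 1 && d.contains "-") || d.size == 0) = false := by
    simp only [Bool.or_eq_false_iff, Bool.and_eq_false_iff, hsz,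
      PySem.Dict.contains_eq_decide_mem_keys, decide_eq_false_iff_not,
      beq_eq_false_iff_ne, ne_eq]
    constructor
    · by_cases hl : d.keys.length = 1
      · right
        obtain ⟨a, ha⟩ := List.length_eq_one_iff.1 hl
        intro hm
        rw [ha] at hm
        exact h1 (by rw [ha, List.mem_singleton.1 hm])
      · left; exact hl
    · intro hl; exact h0 (List.length_eq_zero_iff.1 hl)
  simp only [pv_sorted2_eq, hguard, Bool.false_eq_true, if_false]
  have hcnn : d.keys.map f ≠ [] := by simpa using h0
  cases hcs : PySem.List.sorted (d.keys.map f) (fun p => toLex (p.1, p.2)) true with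
  | nil => exact absurd ((PySem.List.sorted_eq_nil_iff _ _ _).1 hcs) hcnn
  | cons m t =>
  have hperm : (m :: t).Perm (d.keys.map f) := hcs ▸ PySem.List.sorted_perm (d.keys.map f) (fun p => toLex (p.1, p.2)) true
  have hmem_m : m ∈ d.keys.map f := hperm.mem_iff.1 (List.mem_cons_self)
  obtain ⟨x0, hx0k, hx0⟩ := List.mem_map.1 hmem_m
  have hx0eq : x0 = m.2 := congrArg Prod.snd hx0
  rw [pv_max2?_eq]
  by_cases hdash : m.2 = "-"
  · -- top of the sort is '-': A takes the second entry
    cases t with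
    | nil =>
      exfalso
      have hls : d.keys.length = 1 := by simpa using hperm.length_eq.symm
      obtain ⟨a, ha⟩ := List.length_eq_one_iff.1 hls
      rw [ha] at hx0k
      exact h1 (by rw [ha, ← List.mem_singleton.1 hx0k, hx0eq, hdash])
    | cons h2 rest =>
      have hmem_h2 : h2 ∈ d.keys.map f := hperm.mem_iff.1 (by simp)
      obtain ⟨x1, hx1k, hx1⟩ := List.mem_map.1 hmem_h2
      have hx1eq : x1 = h2.2 := congrArg Prod.snd hx1
      have hcnd : (d.keys.map f).Nodup := hnd.map finj
      have hcsnd : (m :: h2 :: rest).Nodup := hperm.nodup_iff.2 hcnd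
      have hmh2 : m ≠ h2 := by
        intro h; rw [h] at hcsnd; simp at hcsnd
      have hx1d : x1 ≠ "-" := by
        intro h
        exact hmh2 (by rw [← hx0, ← hx1, hx0eq, hdash, ← h])
      have hpw := PySem.List.sorted_pairwise_rev (d.keys.map f) (fun p => toLex (p.1, p.2))
      rw [hcs] at hpw
      have hub : ∀ z ∈ h2 :: rest, KK z ≤ KK h2 := by
        intro z hz
        rcases List.mem_cons.1 hz with h | h
        · rw [h]
        · exact (List.pairwise_cons.1 (List.pairwise_cons.1 hpw).2).1 z h
      have hmax : PySem.List.max? (d.keys.filter (fun x => x != "-")) (fun x => toLex (d.getD x 0, x)) = some x1 := by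
        apply pv_max?_unique
        · simp [List.mem_filter, hx1k, hx1d]
        · intro y hy hyne
          obtain ⟨hyk, hyd⟩ := List.mem_filter.1 hy
          have hyd' : y ≠ "-" := by simpa using hyd
          have hfy : f y ∈ m :: h2 :: rest := hperm.mem_iff.2 (List.mem_map_of_mem hyk)
          have hfym : f y ≠ m := by
            intro h; exact hyd' (by rw [← hdash, ← h])
          have hfyt : f y ∈ h2 :: rest := by
            rcases List.mem_cons.1 hfy with h | h
            · exact absurd h hfym
            · exact h
          have hle : KK (f y) ≤ KK h2 := hub _ hfyt
          have hlt : KK (f y) < KK (f x1) :=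
            lt_of_le_of_ne (hx1 ▸ hle) (fun h => hyne (congrArg Prod.snd (KKinj h)))
          exact hlt
      rw [hmax]
      have hnn : (0:Int) ≤ (rest.length : Int) + 1 := by positivity
      have hc1 : (PySem.List.pyGetD (m :: h2 :: rest) 0 ((0:Int), "-")) = m := by
        simp [PySem.List.pyGetD, PySem.List.pyGet?, PySem.List.pyIdx?, hnn]
      have hc2 : (PySem.List.pyGetD (m :: h2 :: rest) 1 ((0:Int), "-")) = h2 := by
        simp [PySem.List.pyGetD, PySem.List.pyGet?, PySem.List.pyIdx?]
      simp [hc1, hc2, hdash, hx1eq]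
  · -- top of the sort is not '-': A takes it directly
    have hx0d : x0 ≠ "-" := by rw [hx0eq]; exact hdash
    have hhead := PySem.List.key_head_sorted_rev_ge (d.keys.map f) (fun p => toLex (p.1, p.2)) hcs
    have hmax : PySem.List.max? (d.keys.filter (fun x => x != "-")) (fun x => toLex (d.getD x 0, x)) = some x0 := by
      apply pv_max?_unique
      · simp [List.mem_filter, hx0k, hx0d]
      · intro y hy hyne
        obtain ⟨hyk, _⟩ := List.mem_filter.1 hy
        have hle : KK (f y) ≤ KK m := hhead _ (List.mem_map_of_mem hyk)
        have hlt : KK (f y) < KK (f x0) :=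
          lt_of_le_of_ne (hx0 ▸ hle) (fun h => hyne (congrArg Prod.snd (KKinj h)))
        exact hlt
    rw [hmax]
    have hc1 : (PySem.List.pyGetD (m :: t) 0 ((0:Int), "-")) = m := by
      simp [PySem.List.pyGetD, PySem.List.pyGet?, PySem.List.pyIdx?]
    simp [hc1, hdash, hx0eq]

-- ===== VERDICT (by name: the statement is the Claim_ definition above) =====
theorem getHighestIndel_spec : Claim_equal_getHighestIndel := by
  intro p1 _
  exact pv_core (PySem.Dict.ofList p1) (PySem.Dict.nodup_keys_ofList p1)
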